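-- pv_equiv track=rewrite | github.com/nilin/cancellations | config.py | orderedunion
-- ===== SOURCE A (Python) =====
-- from collections import deque
--
-- def orderedunion(A,B):
-- 	A,B=list(A),deque(B)
-- 	S=set(A)
-- 	for b in B:
-- 		if b not in S:
-- 			A.append(b)
-- 			S.add(b)
-- 	return A
-- ===== SOURCE B (Python) =====
-- def orderedunion(A, B):
--     A, B = list(A), list(B)
--     first = {}
--     for i, b in reversed(list(enumerate(B))):
--         first[b] = i
--     extras = set(B) - set(A)
--     return A + sorted(extras, key=first.get)
-- ===== Notes on version B (the rewrite author's own statement) =====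
-- stated objective: alternative
-- what changed: Replaces the single interleaved loop that grows A and a seen-set in lockstep by three independent passes: a reverse overwrite pass over enumerate(B) that leaves each element mapped to its first-occurrence index, a set difference set(B) - set(A), and a sort of the surviving elements keyed by that first index; correct because A's loop appends exactly the distinct elements of B outside set(A) in order of first occurrence.
import Mathlib
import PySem

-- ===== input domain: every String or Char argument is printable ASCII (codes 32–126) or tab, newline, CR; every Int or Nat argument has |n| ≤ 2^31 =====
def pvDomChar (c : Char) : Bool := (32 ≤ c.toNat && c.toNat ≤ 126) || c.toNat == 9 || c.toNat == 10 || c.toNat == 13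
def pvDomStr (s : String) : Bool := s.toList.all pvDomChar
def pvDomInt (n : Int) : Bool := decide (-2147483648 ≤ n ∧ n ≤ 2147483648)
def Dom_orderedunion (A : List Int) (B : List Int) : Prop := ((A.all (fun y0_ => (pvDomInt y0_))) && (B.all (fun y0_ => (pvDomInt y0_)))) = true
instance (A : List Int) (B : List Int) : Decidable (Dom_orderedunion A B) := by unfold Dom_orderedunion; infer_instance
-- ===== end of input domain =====

-- B replaces A's single interleaved append-and-grow-set loop by three independent passes:
-- a reverse overwrite pass mapping each element of B to its first index, set difference
-- set(B) - set(A), and a sort keyed on that first index; objective: alternative.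

-- ===== PORT A =====
-- one loop over B carrying the growing list and the growing seen-set together
def orderedunion (A : List Int) (B : List Int) : List Int :=
  (B.foldl
    (fun (st : List Int × PySem.Set Int) b =>
      if PySem.Set.contains st.2 b then st else (st.1 ++ [b], PySem.Set.add st.2 b))
    (A, PySem.Set.ofList A)).1

-- ===== PORT B =====
-- key first.get: elements of extras are always keys of first, so the total .getD 0 form is exact
def orderedunion_alt (A : List Int) (B : List Int) : List Int :=
  let first := ((PySem.List.enumerate B).reverse).foldl
      (fun (d : PySem.Dict Int Int) p => d.insert p.2 p.1) PySem.Dict.empty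
  let extras := PySem.Set.diff (PySem.Set.ofList B) (PySem.Set.ofList A)
  A ++ PySem.List.sorted extras (fun b => first.getD b 0)

-- ===== PRECONDITION & SPEC =====
def Spec_orderedunion (A : List Int) (B : List Int) (out : List Int) : Prop := out = orderedunion_alt A B
instance (A : List Int) (B : List Int) (out : List Int) : Decidable (Spec_orderedunion A B out) := by unfold Spec_orderedunion; infer_instance

-- ===== CLAIM (what is proved, stated in full; the proofs are below) =====
def Claim_equal_orderedunion : Prop := ∀ (A : List Int) (B : List Int), Dom_orderedunion A B → Spec_orderedunion A B (orderedunion A B)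

-- ===== LEMMAS AND PROOFS =====

-- A fold of Set.add from any start set appends exactly the fresh part of set(xs).
theorem foldl_add_eq (xs : List Int) : ∀ s : List Int,
    xs.foldl PySem.Set.add s
      = s ++ (PySem.Set.ofList xs).filter (fun y => !(PySem.Set.contains s y)) := by
  induction xs with
  | nil => intro s; simp [PySem.Set.ofList]
  | cons b xs ih =>
    intro s
    have hofc : PySem.Set.ofList (b :: xs)
        = b :: (PySem.Set.ofList xs).filter (fun y => !(PySem.Set.contains [b] y)) := by
      show (b :: xs).foldl PySem.Set.add [] = _
      rw [List.foldl_cons]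
      simpa using ih (PySem.Set.add [] b)
    rw [List.foldl_cons, ih (PySem.Set.add s b), hofc]
    by_cases hb : b ∈ s
    · rw [PySem.Set.add_of_mem hb]
      have hcb : PySem.Set.contains s b = true := by
        simpa [PySem.Set.contains] using hb
      simp only [List.filter_cons, hcb, Bool.not_true, List.filter_filter]
      congr 1
      apply List.filter_congr
      intro y _
      by_cases hy : y = b
      · subst hy; simp [hb]
      · simp [PySem.Set.contains, hy]
    · rw [PySem.Set.add_of_not_mem hb]
      have hcb : PySem.Set.contains s b = false := by
        simpa [PySem.Set.contains] using hb
      simp only [List.filter_cons, hcb, Bool.not_false, List.filter_filter,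
        List.append_assoc, List.singleton_append]
      congr 2
      apply List.filter_congr
      intro y _
      by_cases hy : y = b
      · subst hy; simp [PySem.Set.contains]
      · simp [PySem.Set.contains, hy]

-- first-occurrence indices strictly increase along set(xs)
theorem ofList_pairwise_idx (xs : List Int) :
    (PySem.Set.ofList xs).Pairwise (fun a c => xs.idxOf a < xs.idxOf c) := by
  induction xs with
  | nil => simp [PySem.Set.ofList]
  | cons b xs ih =>
    have hofc : PySem.Set.ofList (b :: xs)
        = b :: (PySem.Set.ofList xs).filter (fun y => !(PySem.Set.contains [b] y)) := by
      show (b :: xs).foldl PySem.Set.add [] = _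
      rw [List.foldl_cons]
      simpa using foldl_add_eq xs (PySem.Set.add [] b)
    rw [hofc]
    constructor
    · intro c hc
      have hcb : c ≠ b := by
        have := List.of_mem_filter hc
        simpa [PySem.Set.contains] using this
      simp [Ne.symm hcb]
    · refine (ih.filter _).imp_of_mem ?_
      intro a c ha hc h
      have hab : a ≠ b := by
        have := List.of_mem_filter ha
        simpa [PySem.Set.contains] using this
      have hcb : c ≠ b := by
        have := List.of_mem_filter hc
        simpa [PySem.Set.contains] using this
      simp [Ne.symm hab, Ne.symm hcb]
      omega

-- overwrite fold over a pair list reads back as find? on the reversed list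
theorem foldl_insert_get? (P : List (Int × Int)) : ∀ (d : PySem.Dict Int Int) (b : Int),
    (P.foldl (fun d p => d.insert p.2 p.1) d).get? b
      = match P.reverse.find? (fun p => p.2 == b) with
        | some p => some p.1
        | none => d.get? b := by
  induction P with
  | nil => intro d b; simp
  | cons p P ih =>
    intro d b
    rw [List.foldl_cons, ih]
    rw [List.reverse_cons, List.find?_append]
    cases hf : P.reverse.find? (fun q => q.2 == b) with
    | some q => simp
    | none =>
      simp only [Option.none_or]
      rw [PySem.Dict.get?_insert]
      by_cases hb : b = p.2
      · simp [hb]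
      · simp [Ne.symm hb, hb]

-- the first pair of enumerate with second component b carries idxOf
theorem find?_enumerate (B : List Int) (b : Int) (h : b ∈ B) : ∀ s : Int,
    (PySem.List.enumerate B s).find? (fun p => p.2 == b) = some (s + B.idxOf b, b) := by
  induction B with
  | nil => cases h
  | cons x xs ih =>
    intro s
    rw [PySem.List.enumerate_cons, List.find?_cons]
    by_cases hx : x = b
    · subst hx; simp
    · rcases List.mem_cons.mp h with h' | h'
      · exact absurd h'.symm hx
      · have := ih h' (s + 1)
        simp only [this, List.idxOf_cons]
        have hxb : (x == b) = false := by simp [hx]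
        simp only [hxb, cond_false]
        congr 1
        push_cast
        ring_nf

-- first.get(b) for b ∈ B is b's first-occurrence index in B
theorem firstIdx_getD (B : List Int) (b : Int) (h : b ∈ B) :
    (((PySem.List.enumerate B).reverse).foldl
        (fun (d : PySem.Dict Int Int) p => d.insert p.2 p.1) PySem.Dict.empty).getD b 0
      = (B.idxOf b : Int) := by
  have := foldl_insert_get? ((PySem.List.enumerate B).reverse) PySem.Dict.empty b
  rw [List.reverse_reverse, find?_enumerate B b h 0] at this
  simp only [PySem.Dict.getD, this]
  norm_num

-- Loop invariant for A's fold (state = (accumulated list, its seen-set)).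
theorem orderedunion_loop (bs : List Int) : ∀ (A₀ acc : List Int) (S t : PySem.Set Int),
    (∀ x, PySem.Set.contains S x = true ↔ x ∈ acc) →
    acc = A₀ ++ t.filter (fun b => !(PySem.Set.contains (PySem.Set.ofList A₀) b)) →
    (∀ x, x ∈ acc ↔ x ∈ A₀ ∨ x ∈ t) →
    (bs.foldl
      (fun (st : List Int × PySem.Set Int) b =>
        if PySem.Set.contains st.2 b then st else (st.1 ++ [b], PySem.Set.add st.2 b))
      (acc, S)).1
      = A₀ ++ (bs.foldl PySem.Set.add t).filter
          (fun b => !(PySem.Set.contains (PySem.Set.ofList A₀) b)) := by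
  induction bs with
  | nil => intro A₀ acc S t h1 h2 h3; simpa using h2
  | cons b bs ih =>
    intro A₀ acc S t h1 h2 h3
    simp only [List.foldl_cons]
    by_cases hb : b ∈ acc
    · rw [if_pos ((h1 b).mpr hb)]
      by_cases hbt : b ∈ t
      · have : PySem.Set.add t b = t := by
          simp [PySem.Set.add, PySem.Set.contains, hbt]
        rw [this]
        exact ih A₀ acc S t h1 h2 h3
      · have hbA : b ∈ A₀ := by
          rcases (h3 b).mp hb with h | h
          · exact h
          · exact absurd h hbt
        have hadd : PySem.Set.add t b = t ++ [b] := by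
          simp [PySem.Set.add, PySem.Set.contains, hbt]
        rw [hadd]
        refine ih A₀ acc S (t ++ [b]) h1 ?_ ?_
        · rw [h2, List.filter_append]
          simp [PySem.Set.contains, hbA]
        · intro x
          rw [h3 x]
          constructor
          · rintro (h | h) <;> simp [h]
          · rintro (h | h)
            · exact Or.inl h
            · rcases List.mem_append.mp h with h | h
              · exact Or.inr h
              · simp at h; subst h; exact Or.inl hbA
    · rw [if_neg (by simpa using fun h => hb ((h1 b).mp h))]
      have hbt : b ∉ t := fun h => hb ((h3 b).mpr (Or.inr h))
      have hbA : b ∉ A₀ := fun h => hb ((h3 b).mpr (Or.inl h))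
      have hadd : PySem.Set.add t b = t ++ [b] := by
        simp [PySem.Set.add, PySem.Set.contains, hbt]
      rw [hadd]
      refine ih A₀ (acc ++ [b]) (PySem.Set.add S b) (t ++ [b]) ?_ ?_ ?_
      · intro x
        constructor
        · intro h
          have : x ∈ PySem.Set.add S b := by
            simpa [PySem.Set.contains] using h
          rcases (by simpa [pysem] using this : x ∈ S ∨ x = b) with h' | h'
          · exact List.mem_append.mpr (Or.inl ((h1 x).mp (by simpa [PySem.Set.contains] using h')))
          · subst h'; simp
        · intro h
          rcases List.mem_append.mp h with h' | h'
          · have : x ∈ S := by simpa [PySem.Set.contains] using (h1 x).mpr h'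
            simp [PySem.Set.contains, PySem.Set.add]
            split <;> simp_all
          · simp at h'; subst h'
            simp [PySem.Set.contains, PySem.Set.add]
            split <;> simp_all [PySem.Set.contains]
      · rw [h2, List.filter_append]
        simp [PySem.Set.contains, hbA]
      · intro x
        constructor
        · intro h
          rcases List.mem_append.mp h with h' | h'
          · rcases (h3 x).mp h' with h'' | h''
            · exact Or.inl h''
            · exact Or.inr (by simp [h''])
          · simp at h'; subst h'; exact Or.inr (by simp)
        · rintro (h | h)
          · exact List.mem_append.mpr (Or.inl ((h3 x).mpr (Or.inl h)))
          · rcases List.mem_append.mp h with h' | h'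
            · exact List.mem_append.mpr (Or.inl ((h3 x).mpr (Or.inr h')))
            · simp at h'; subst h'; simp

-- ===== VERDICT (by name: the statement is the Claim_ definition above) =====
theorem orderedunion_spec : Claim_equal_orderedunion := by
  intro A B _
  unfold Spec_orderedunion orderedunion orderedunion_alt
  have hA : (B.foldl
      (fun (st : List Int × PySem.Set Int) b =>
        if PySem.Set.contains st.2 b then st else (st.1 ++ [b], PySem.Set.add st.2 b))
      (A, PySem.Set.ofList A)).1
      = A ++ (PySem.Set.ofList B).filter (fun b => !(PySem.Set.contains (PySem.Set.ofList A) b)) := by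
    have := orderedunion_loop B A A (PySem.Set.ofList A) []
      (fun x => by simp [PySem.Set.contains, pysem])
      (by simp)
      (fun x => by simp)
    simpa [PySem.Set.ofList] using this
  rw [hA]
  have hdiff : PySem.Set.diff (PySem.Set.ofList B) (PySem.Set.ofList A)
      = (PySem.Set.ofList B).filter (fun b => !(PySem.Set.contains (PySem.Set.ofList A) b)) := rfl
  have hsorted : PySem.List.sorted
      ((PySem.Set.ofList B).filter (fun b => !(PySem.Set.contains (PySem.Set.ofList A) b)))
      (fun b => (((PySem.List.enumerate B).reverse).foldl
          (fun (d : PySem.Dict Int Int) p => d.insert p.2 p.1) PySem.Dict.empty).getD b 0)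
      = (PySem.Set.ofList B).filter (fun b => !(PySem.Set.contains (PySem.Set.ofList A) b)) := by
    apply PySem.List.sorted_eq_self_of_pairwise
    refine ((ofList_pairwise_idx B).filter _).imp_of_mem ?_
    intro a c ha hc h
    have haB : a ∈ B := (PySem.Set.mem_ofList B a).mp (List.mem_of_mem_filter ha)
    have hcB : c ∈ B := (PySem.Set.mem_ofList B c).mp (List.mem_of_mem_filter hc)
    rw [firstIdx_getD B a haB, firstIdx_getD B c hcB]
    exact_mod_cast le_of_lt h
  simp only [hdiff, hsorted]
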